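-- pv_equiv track=rewrite | github.com/SixingYan/Sketch-for-Data-Stream | experiment/compareCGM.py | getStrategy
-- ===== SOURCE A (Python) =====
-- def getStrategy(pathDict):
--     # edge=0 seperate  edge=1 combine
--     j = 0
--     strategy = []#[[],...[]]
--     for i in range(len(pathDict['partID'])):
--         if i == len(pathDict['partID'])-1:
--             continue
--         if i == 0:
--             strategy.append([])
--             strategy[j].append(pathDict['partID'][i])
--         edge = pathDict['edgeType'][i]
--         if edge == 1:
--             strategy[j].append(pathDict['partID'][i+1])
--         else:
--             strategy.append([])
--             j += 1
--             strategy[j].append(pathDict['partID'][i+1])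
--     return strategy
-- ===== SOURCE B (Python) =====
-- def getStrategy(pathDict):
--     # builds the grouping back-to-front: start from the last part and prepend
--     partID = pathDict['partID']
--     if len(partID) < 2:
--         return []
--     edgeType = pathDict['edgeType']
--     groups = [[partID[-1]]]
--     for x, e in zip(partID[-2::-1], edgeType[len(partID) - 2::-1]):
--         if e == 1:
--             groups[0].insert(0, x)
--         else:
--             groups.insert(0, [x])
--     return groups
-- ===== Notes on version B (the rewrite author's own statement) =====
-- stated objective: alternative
-- what changed: A walks the indices left-to-right keeping a running group index j and appending element-by-element; B builds the grouping back-to-front, zipping the reversed part list with the reversed edge list and prepending to (or opening) the front group, with an early return for fewer than two parts.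
import Mathlib
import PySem

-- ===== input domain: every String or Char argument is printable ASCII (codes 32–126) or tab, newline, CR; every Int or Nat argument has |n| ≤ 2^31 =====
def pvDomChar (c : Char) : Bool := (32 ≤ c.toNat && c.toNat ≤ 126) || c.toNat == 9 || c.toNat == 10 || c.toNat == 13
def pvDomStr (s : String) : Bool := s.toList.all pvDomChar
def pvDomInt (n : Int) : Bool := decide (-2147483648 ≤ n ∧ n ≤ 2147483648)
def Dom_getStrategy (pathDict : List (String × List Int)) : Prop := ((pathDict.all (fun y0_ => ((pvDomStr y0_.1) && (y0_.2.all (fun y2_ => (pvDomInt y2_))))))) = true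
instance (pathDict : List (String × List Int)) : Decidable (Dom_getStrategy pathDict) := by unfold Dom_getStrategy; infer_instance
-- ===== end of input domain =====

-- B builds the same grouping back-to-front (right fold with prepends) instead of A's
-- forward loop over indices with a running group index j; objective: alternative decomposition.

-- ===== PORT A =====
def getStrategy (pathDict : List (String × List Int)) : List (List Int) :=
  let ps := (PySem.Dict.get? (PySem.Dict.mk pathDict) "partID").getD []
  let es := (PySem.Dict.get? (PySem.Dict.mk pathDict) "edgeType").getD []
  let n := ps.length
  ((List.range n).foldl (fun (st : Nat × List (List Int)) (i : Nat) =>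
      if i = n - 1 then st
      else
        let s1 := if i = 0 then (st.2 ++ [[]]).modify st.1 (· ++ [ps.getD i 0]) else st.2
        let edge := es.getD i 0
        if edge = 1 then (st.1, s1.modify st.1 (· ++ [ps.getD (i+1) 0]))
        else (st.1 + 1, (s1 ++ [[]]).modify (st.1 + 1) (· ++ [ps.getD (i+1) 0])))
    ((0 : Nat), ([] : List (List Int)))).2

-- ===== PORT B =====
def getStrategy_alt (pathDict : List (String × List Int)) : List (List Int) :=
  let ps := (PySem.Dict.get? (PySem.Dict.mk pathDict) "partID").getD []
  if ps.length < 2 then []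
  else
    let es := (PySem.Dict.get? (PySem.Dict.mk pathDict) "edgeType").getD []
    let revP := ps.dropLast.reverse                      -- partID[-2::-1]
    let revE := (es.take (ps.length - 1)).reverse        -- edgeType[n-2::-1]
    (revP.zip revE).foldl (fun (groups : List (List Int)) (xe : Int × Int) =>
        if xe.2 = 1 then groups.modify 0 (xe.1 :: ·) else [xe.1] :: groups)
      [[ps.getLastD 0]]

-- ===== PRECONDITION & SPEC =====
-- Pre_ excludes exactly the inputs where Python A raises: a missing 'partID' key (KeyError),
-- and — when partID has ≥ 2 elements — a missing 'edgeType' key or one with fewer than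
-- len(partID)-1 entries (KeyError/IndexError).
def Pre_getStrategy (pathDict : List (String × List Int)) : Prop :=
  ((match PySem.Dict.get? (PySem.Dict.mk pathDict) "partID" with
  | none => false
  | some ps =>
    decide (ps.length < 2) ||
      match PySem.Dict.get? (PySem.Dict.mk pathDict) "edgeType" with
      | none => false
      | some es => decide (ps.length - 1 ≤ es.length)) = true)

instance (pathDict : List (String × List Int)) : Decidable (Pre_getStrategy pathDict) := by
  unfold Pre_getStrategy; infer_instance

def pvWitness_getStrategy : (List (String × List Int)) :=
  [("partID", [1, 2, 3, 4]), ("edgeType", [1, 0, 1])]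

def Spec_getStrategy (pathDict : List (String × List Int)) (out : List (List Int)) : Prop := out = getStrategy_alt pathDict
instance (pathDict : List (String × List Int)) (out : List (List Int)) : Decidable (Spec_getStrategy pathDict out) := by unfold Spec_getStrategy; infer_instance

-- ===== CLAIM (what is proved, stated in full; the proofs are below) =====
def Claim_equal_getStrategy : Prop := ∀ (pathDict : List (String × List Int)), Dom_getStrategy pathDict → Pre_getStrategy pathDict → Spec_getStrategy pathDict (getStrategy pathDict)

-- ===== LEMMAS AND PROOFS =====

-- the current-group extension recursion that A's forward loop realises
def pvExt (ps es : List Int) : List Int → Nat → Nat → List (List Int)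
  | cur, _, 0 => [cur]
  | cur, m, Nat.succ k =>
    if es.getD m 0 = 1 then pvExt ps es (cur ++ [ps.getD (m+1) 0]) (m+1) k
    else cur :: pvExt ps es [ps.getD (m+1) 0] (m+1) k

-- the back-to-front recursion that B's fold realises
def pvBF (z : Int) : List (Int × Int) → List (List Int)
  | [] => [[z]]
  | (x, e) :: r => if e = 1 then (pvBF z r).modify 0 (x :: ·) else [x] :: pvBF z r

-- A's loop body for indices 1 ≤ i < n-1 (skip and i=0 branches removed)
def pvStep (ps es : List Int) (st : Nat × List (List Int)) (i : Nat) : Nat × List (List Int) :=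
  if es.getD i 0 = 1 then (st.1, st.2.modify st.1 (· ++ [ps.getD (i+1) 0]))
  else (st.1 + 1, (st.2 ++ [[]]).modify (st.1 + 1) (· ++ [ps.getD (i+1) 0]))

lemma pv_modify_last {α : Type} (t : List α) (g : α) (f : α → α) :
    (t ++ [g]).modify t.length f = t ++ [f g] := by
  induction t with
  | nil => simp
  | cons a t ih => simp [ih]

lemma pv_modify_zero_id {α : Type} (l : List α) : (l.modify 0 fun x => x) = l := by
  cases l <;> simp [List.modify_cons]

lemma pv_modify_zero_cons {α : Type} (a : α) (l : List α) (f : α → α) :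
    (a :: l).modify 0 f = f a :: l := by
  simp [List.modify_cons]

lemma pv_modify_zero_comp {α : Type} (l : List α) (f g : α → α) :
    (l.modify 0 f).modify 0 g = l.modify 0 (g ∘ f) := by
  cases l <;> simp [List.modify_cons]

-- equation lemmas stated with the hypothesis, to rewrite past the if-conditions
lemma pvExt_succ_pos (ps es : List Int) (cur : List Int) (m k : Nat) (h : es.getD m 0 = 1) :
    pvExt ps es cur m (k+1) = pvExt ps es (cur ++ [ps.getD (m+1) 0]) (m+1) k := by
  rw [pvExt]; rw [if_pos h]


lemma pvExt_succ_neg (ps es : List Int) (cur : List Int) (m k : Nat) (h : ¬ es.getD m 0 = 1) :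
    pvExt ps es cur m (k+1) = cur :: pvExt ps es [ps.getD (m+1) 0] (m+1) k := by
  rw [pvExt]; rw [if_neg h]


lemma pvBF_cons_pos (z : Int) (x e : Int) (r : List (Int × Int)) (h : e = 1) :
    pvBF z ((x, e) :: r) = (pvBF z r).modify 0 (x :: ·) := by
  rw [pvBF]; rw [if_pos h]

lemma pvBF_cons_neg (z : Int) (x e : Int) (r : List (Int × Int)) (h : ¬ e = 1) :
    pvBF z ((x, e) :: r) = [x] :: pvBF z r := by
  rw [pvBF]; rw [if_neg h]

lemma pvStep_pos (ps es : List Int) (st : Nat × List (List Int)) (i : Nat)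
    (h : es.getD i 0 = 1) :
    pvStep ps es st i = (st.1, st.2.modify st.1 (· ++ [ps.getD (i+1) 0])) := by
  rw [pvStep]; rw [if_pos h]

lemma pvStep_neg (ps es : List Int) (st : Nat × List (List Int)) (i : Nat)
    (h : ¬ es.getD i 0 = 1) :
    pvStep ps es st i = (st.1 + 1, (st.2 ++ [[]]).modify (st.1 + 1) (· ++ [ps.getD (i+1) 0])) := by
  rw [pvStep]; rw [if_neg h]

-- invariant of A's main loop
lemma pv_loop_inv (ps es : List Int) :
    ∀ (k m : Nat) (t : List (List Int)) (g : List Int),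
      (List.range' m k 1).foldl (pvStep ps es) (t.length, t ++ [g]) =
        (t.length + (pvExt ps es g m k).length - 1, t ++ pvExt ps es g m k) := by
  intro k
  induction k with
  | zero => intro m t g; simp [pvExt]
  | succ k ih =>
    intro m t g
    rw [List.range'_succ, List.foldl_cons]
    by_cases he : es.getD m 0 = 1
    · rw [pvStep_pos ps es _ m he]
      have hm : ((t.length, t ++ [g]).1, (t.length, t ++ [g]).2.modify (t.length, t ++ [g]).1
          (· ++ [ps.getD (m+1) 0])) = (t.length, t ++ [g ++ [ps.getD (m+1) 0]]) := by
        simp only []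
        rw [pv_modify_last]
      rw [hm, ih (m+1) t (g ++ [ps.getD (m+1) 0]), pvExt_succ_pos ps es g m k he]
    · rw [pvStep_neg ps es _ m he]
      have hm : ((t.length, t ++ [g]).1 + 1, ((t.length, t ++ [g]).2 ++ [[]]).modify
          ((t.length, t ++ [g]).1 + 1) (· ++ [ps.getD (m+1) 0])) =
          ((t ++ [g]).length, (t ++ [g]) ++ [[ps.getD (m+1) 0]]) := by
        simp only []
        have h := pv_modify_last (α := List Int) (t ++ [g]) [] (· ++ [ps.getD (m+1) 0])
        simp only [Prod.mk.injEq]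
        refine ⟨by simp, ?_⟩
        rw [show t.length + 1 = (t ++ [g]).length by simp]
        simpa using h
      rw [hm, ih (m+1) (t ++ [g]) [ps.getD (m+1) 0], pvExt_succ_neg ps es g m k he]
      simp only [Prod.mk.injEq, List.length_append, List.length_cons, List.length_nil]
      exact ⟨by omega, by simp⟩

-- link between the forward extension recursion and the back-to-front recursion
lemma pv_ext_bf (ps es : List Int) :
    ∀ (k m : Nat) (cur : List Int),
      pvExt ps es (cur ++ [ps.getD m 0]) m k =
        (pvBF (ps.getD (m + k) 0)
            ((List.range' m k 1).map (fun i => (ps.getD i 0, es.getD i 0)))).modify 0 (cur ++ ·) := by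
  intro k
  induction k with
  | zero => intro m cur; simp [pvExt, pvBF, List.modify_cons]
  | succ k ih =>
    intro m cur
    rw [List.range'_succ]
    simp only [List.map_cons]
    have harith : m + 1 + k = m + (k + 1) := by omega
    by_cases he : es.getD m 0 = 1
    · rw [pvBF_cons_pos _ _ _ _ he]
      rw [pvExt_succ_pos ps es _ m k he]
      have h2 := ih (m+1) (cur ++ [ps.getD m 0])
      rw [List.append_assoc] at h2
      simp only [List.singleton_append] at h2
      rw [show (cur ++ [ps.getD m 0]) ++ [ps.getD (m+1) 0] =
        cur ++ [ps.getD m 0, ps.getD (m+1) 0] by simp, h2, pv_modify_zero_comp, harith]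
      congr 1
      funext x
      simp
    · rw [pvBF_cons_neg _ _ _ _ he]
      rw [pvExt_succ_neg ps es _ m k he]
      have h2 := ih (m+1) []
      simp only [List.nil_append] at h2
      rw [h2, harith]
      rw [pv_modify_zero_id, pv_modify_zero_cons]

-- B's zipped reversed lists are the reverse of the forward pair list
lemma pv_zip_pairs (ps es : List Int) (h2 : 2 ≤ ps.length) (hlen : ps.length - 1 ≤ es.length) :
    ps.dropLast.reverse.zip (es.take (ps.length - 1)).reverse =
      ((List.range' 0 (ps.length - 1) 1).map (fun i => (ps.getD i 0, es.getD i 0))).reverse := by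
  have hd : ps.dropLast.length = ps.length - 1 := by simp
  have ht : (es.take (ps.length - 1)).length = ps.length - 1 := by
    simp [Nat.min_eq_left hlen]
  apply List.ext_getElem
  · simp [hd, ht]
  · intro i h1 h2'
    have hzlen : (ps.dropLast.reverse.zip (es.take (ps.length - 1)).reverse).length = ps.length - 1 := by
      simp [hd, ht]
    have hi : i < ps.length - 1 := by rw [hzlen] at h1; exact h1
    rw [List.getElem_zip]
    rw [List.getElem_reverse, List.getElem_reverse, List.getElem_reverse]
    rw [List.getElem_map, List.getElem_range']
    have hlm : (List.range' 0 (ps.length - 1)).length = ps.length - 1 := by simp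
    have hge1 : ps.dropLast[ps.dropLast.length - 1 - i]'(by omega) =
        ps.getD (ps.length - 1 - 1 - i) 0 := by
      rw [List.getElem_dropLast, List.getD_eq_getElem ps 0 (by omega)]
      congr 1
      omega
    have hge2 : (es.take (ps.length - 1))[(es.take (ps.length - 1)).length - 1 - i]'(by omega) =
        es.getD (ps.length - 1 - 1 - i) 0 := by
      rw [List.getElem_take, List.getD_eq_getElem es 0 (by omega)]
      congr 1
      omega
    rw [hge1, hge2]
    have hidx : 0 + 1 * ((List.map (fun i => (ps.getD i 0, es.getD i 0))
        (List.range' 0 (ps.length - 1))).length - 1 - i) = ps.length - 1 - 1 - i := by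
      simp
    rw [hidx]

lemma pv_getD_last (l : List Int) : l.getD (l.length - 1) 0 = l.getLastD 0 := by
  rw [List.getD_eq_getElem?_getD, List.getLastD_eq_getLast?, List.getLast?_eq_getElem?]

-- B's fold is pvBF on the reversed pair list
lemma pv_foldl_bf (z : Int) (l : List (Int × Int)) :
    l.reverse.foldl (fun (groups : List (List Int)) (xe : Int × Int) =>
        if xe.2 = 1 then groups.modify 0 (xe.1 :: ·) else [xe.1] :: groups) [[z]] = pvBF z l := by
  rw [List.foldl_reverse]
  induction l with
  | nil => simp [pvBF]
  | cons a l ih =>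
    obtain ⟨x, e⟩ := a
    simp only [List.foldr_cons, ih, pvBF]

-- ===== VERDICT (by name: the statement is the Claim_ definition above) =====
theorem getStrategy_spec : Claim_equal_getStrategy := by
  intro d _hdom hpre
  show getStrategy d = getStrategy_alt d
  unfold Pre_getStrategy at hpre
  cases hps : PySem.Dict.get? (PySem.Dict.mk d) "partID" with
  | none => rw [hps] at hpre; exact absurd hpre (by simp)
  | some ps =>
  rw [hps] at hpre
  simp only [Bool.or_eq_true, decide_eq_true_eq] at hpre
  by_cases hsmall : ps.length < 2
  · -- n ∈ {0,1}: A's loop does nothing (or only skips), B returns [] at once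
    unfold getStrategy getStrategy_alt
    rw [hps]
    simp only [Option.getD_some, if_pos hsmall]
    match ps, hsmall with
    | [], _ => simp
    | [x], _ => simp [List.range_succ]
  · -- n ≥ 2
    have h2 : 2 ≤ ps.length := by omega
    have hpre' := hpre.resolve_left hsmall
    cases hes : PySem.Dict.get? (PySem.Dict.mk d) "edgeType" with
    | none => rw [hes] at hpre'; exact absurd hpre' (by simp)
    | some es =>
    rw [hes] at hpre'
    simp only [decide_eq_true_eq] at hpre'
    obtain ⟨p0, p1, rest, hps_eq⟩ : ∃ p0 p1 rest, ps = p0 :: p1 :: rest := by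
      match ps, h2 with
      | p0 :: p1 :: rest, _ => exact ⟨p0, p1, rest, rfl⟩
    subst hps_eq
    set n := (p0 :: p1 :: rest).length with hn
    have hn2 : n = rest.length + 2 := by simp [hn]
    set ps := p0 :: p1 :: rest with hps'
    -- reduce A to the invariant form
    unfold getStrategy
    rw [hps, hes]
    simp only [Option.getD_some]
    rw [List.range_eq_range']
    -- split off the last index (the 'continue' iteration)
    have hsplit : List.range' 0 n 1 = List.range' 0 (n - 1) 1 ++ [n - 1] := by
      conv_lhs => rw [show n = (n - 1) + 1 from by omega]
      rw [List.range'_1_concat]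
      simp
    rw [hsplit, List.foldl_append]
    set f := fun (st : Nat × List (List Int)) (i : Nat) =>
      if i = n - 1 then st
      else
        let s1 := if i = 0 then (st.2 ++ [[]]).modify st.1 (· ++ [ps.getD i 0]) else st.2
        let edge := es.getD i 0
        if edge = 1 then (st.1, s1.modify st.1 (· ++ [ps.getD (i+1) 0]))
        else (st.1 + 1, (s1 ++ [[]]).modify (st.1 + 1) (· ++ [ps.getD (i+1) 0])) with hf
    have hlast : ∀ st : Nat × List (List Int), List.foldl f st [n-1] = st := by
      intro st; simp [hf]
    -- peel off i = 0
    have hsplit0 : List.range' 0 (n - 1) 1 = 0 :: List.range' 1 (n - 2) 1 := by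
      have : n - 1 = (n - 2) + 1 := by omega
      rw [this, List.range'_succ]
    rw [hsplit0]
    have hstep0 : f ((0 : Nat), ([] : List (List Int))) 0 = (if es.getD 0 0 = 1 then ((0 : Nat), [[p0, p1]])
        else ((1 : Nat), [[p0], [p1]])) := by
      have hne : ¬ ((0 : Nat) = n - 1) := by omega
      have he0' : (es[0]?.getD 0 = 1) = (es.getD 0 0 = 1) := by
        simp [List.getD_eq_getElem?_getD]
      by_cases he0 : es.getD 0 0 = 1
      · simp [hf, hne, he0', hps', List.modify_cons]
      · simp [hf, hne, he0', hps', List.modify_cons]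
    -- replace the body by pvStep on the remaining indices (all ≠ 0 and < n-1)
    have hcong : ∀ st : Nat × List (List Int), List.foldl f st (List.range' 1 (n - 2) 1) =
        List.foldl (pvStep ps es) st (List.range' 1 (n - 2) 1) := by
      intro st
      apply PySem.List.foldl_congr_mem
      intro acc x hx
      have hx' := List.mem_range'_1.mp hx
      have hxne0 : x ≠ 0 := by omega
      have hxnel : x ≠ n - 1 := by omega
      simp only [hf, pvStep, if_neg hxnel, if_neg hxne0]
    rw [hlast, List.foldl_cons, hstep0]
    -- now apply the invariant, splitting on the first edge
    by_cases he0 : es.getD 0 0 = 1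
    · rw [if_pos he0, hcong]
      have hinv := pv_loop_inv ps es (n - 2) 1 [] [p0, p1]
      simp only [List.length_nil, List.nil_append, Nat.zero_add] at hinv
      rw [hinv]
      -- B side
      unfold getStrategy_alt
      rw [hps, hes]
      simp only [Option.getD_some, if_neg (by omega : ¬ ps.length < 2)]
      rw [pv_zip_pairs ps es h2 hpre', pv_foldl_bf]
      -- expand the first pair on the B side
      have hb : List.range' 0 (ps.length - 1) 1 = 0 :: List.range' 1 (n - 2) 1 := by
        have : ps.length - 1 = (n - 2) + 1 := by simp only [← hn]; omega
        rw [this, List.range'_succ]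
      rw [hb]
      simp only [List.map_cons, pvBF, if_pos he0]
      -- A side via pv_ext_bf with cur = [p0]
      have hk := pv_ext_bf ps es (n - 2) 1 [p0]
      have hg1 : ps.getD 1 0 = p1 := by simp [hps']
      have hglast : ps.getD (1 + (n - 2)) 0 = ps.getLastD 0 := by
        rw [show 1 + (n - 2) = ps.length - 1 from by simp only [← hn]; omega]
        exact pv_getD_last ps
      rw [hg1] at hk
      have : ([p0] ++ [p1] : List Int) = [p0, p1] := by simp
      rw [this] at hk
      rw [hk, hglast, show (ps.getD 0 0) = p0 from by simp [hps']]
      rfl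
    · rw [if_neg he0, hcong]
      have hinv := pv_loop_inv ps es (n - 2) 1 [[p0]] [p1]
      simp only [List.length_cons, List.length_nil, Nat.zero_add] at hinv
      have : ([[p0]] ++ [[p1]] : List (List Int)) = [[p0], [p1]] := by simp
      rw [this] at hinv
      rw [hinv]
      unfold getStrategy_alt
      rw [hps, hes]
      simp only [Option.getD_some, if_neg (by omega : ¬ ps.length < 2)]
      rw [pv_zip_pairs ps es h2 hpre', pv_foldl_bf]
      have hb : List.range' 0 (ps.length - 1) 1 = 0 :: List.range' 1 (n - 2) 1 := by
        have : ps.length - 1 = (n - 2) + 1 := by simp only [← hn]; omega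
        rw [this, List.range'_succ]
      rw [hb]
      simp only [List.map_cons, pvBF, if_neg he0]
      have hk := pv_ext_bf ps es (n - 2) 1 []
      simp only [List.nil_append] at hk
      have hg1 : ps.getD 1 0 = p1 := by simp [hps']
      have hglast : ps.getD (1 + (n - 2)) 0 = ps.getLastD 0 := by
        rw [show 1 + (n - 2) = ps.length - 1 from by simp only [← hn]; omega]
        exact pv_getD_last ps
      rw [hg1] at hk
      rw [hk, hglast, pv_modify_zero_id, show (ps.getD 0 0) = p0 from by simp [hps']]
      rfl
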